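-- pv_equiv track=rewrite | github.com/GuiCaDog/AlgorithmContest | Week10/fragileletters/asci.py | getPmin
-- ===== SOURCE A (Python) =====
-- def getPmin(points):
--     px = 2000
--     py = 2000
--     minI = -1
--     for p in points:
--         if p[0] < px:
--             px = p[0]
--             py = p[1]
--             minI = p[2]
--         elif p[0] == px and p[1] < py:
--             py = p[1]
--             minI = p[2]
--
--     return (px, py, minI)
-- ===== SOURCE B (Python) =====
-- def getPmin(points):
--     cand = [(2000, 2000, -1)] + list(points)
--     cand = sorted(cand, key=lambda p: (p[0], p[1]))
--     best = cand[0]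
--     return (best[0], best[1], best[2])
-- ===== Notes on version B (the rewrite author's own statement) =====
-- stated objective: alternative
-- what changed: Replaces the running-minimum loop with prepending the (2000,2000,-1) sentinel as a real candidate and taking the head of a stable sort by the (x,y) key, which reproduces A's tie-breaking (earliest point wins equal keys).
import Mathlib
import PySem

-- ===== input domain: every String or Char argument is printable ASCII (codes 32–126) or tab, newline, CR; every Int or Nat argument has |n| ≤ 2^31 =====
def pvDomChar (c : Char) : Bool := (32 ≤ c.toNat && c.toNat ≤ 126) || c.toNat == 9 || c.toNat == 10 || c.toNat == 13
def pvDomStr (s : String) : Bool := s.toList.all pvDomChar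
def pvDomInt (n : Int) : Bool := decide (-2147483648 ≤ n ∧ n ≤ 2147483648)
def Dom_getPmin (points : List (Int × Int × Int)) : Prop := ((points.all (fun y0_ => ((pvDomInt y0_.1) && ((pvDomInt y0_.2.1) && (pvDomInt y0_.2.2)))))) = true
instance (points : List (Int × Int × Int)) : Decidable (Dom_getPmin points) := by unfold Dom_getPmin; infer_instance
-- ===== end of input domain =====

-- B replaces A's running-minimum loop by prepending the sentinel as a candidate and taking the
-- head of a stable sort on the (x, y) key (alternative decomposition, not faster).


-- ===== PORT A =====
-- literal port of A's for-loop over the state (px, py, minI)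
def getPmin (points : List (Int × Int × Int)) : Int × Int × Int :=
  points.foldl
    (fun (s : Int × Int × Int) p =>
      if p.1 < s.1 then (p.1, p.2.1, p.2.2)
      else if p.1 = s.1 ∧ p.2.1 < s.2.1 then (s.1, p.2.1, p.2.2)
      else s)
    (2000, 2000, -1)

-- ===== PORT B =====
-- literal port of Source B: prepend the sentinel, stable-sort by the tuple key (p[0], p[1]), take index 0
def getPmin_alt (points : List (Int × Int × Int)) : Int × Int × Int :=
  let cand := (2000, 2000, -1) :: points
  let sorted := PySem.List.sorted2 cand (fun p => p.1) (fun p => p.2.1)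
  let best := PySem.List.pyGetD sorted 0 (2000, 2000, -1)  -- cand ≠ [], so cand[0] never raises
  (best.1, best.2.1, best.2.2)

-- ===== PRECONDITION & SPEC =====
def Spec_getPmin (points : List (Int × Int × Int)) (out : Int × Int × Int) : Prop := out = getPmin_alt points
instance (points : List (Int × Int × Int)) (out : Int × Int × Int) : Decidable (Spec_getPmin points out) := by unfold Spec_getPmin; infer_instance

-- ===== CLAIM (what is proved, stated in full; the proofs are below) =====
def Claim_equal_getPmin : Prop := ∀ (points : List (Int × Int × Int)), Dom_getPmin points → Spec_getPmin points (getPmin points)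

-- ===== LEMMAS AND PROOFS =====

-- the strict lexicographic "comes-before" test used by sorted2 on the key (p.1, p.2.1)
def pvLt (a b : Int × Int × Int) : Bool :=
  decide (a.1 < b.1) || (!decide (b.1 < a.1) && decide (a.2.1 < b.2.1))

theorem pv_insertBy_head (x h : Int × Int × Int) (t : List (Int × Int × Int)) :
    PySem.List.insertBy pvLt x (h :: t) =
      (if pvLt x h then x else h) ::
        (if pvLt x h then h :: t else PySem.List.insertBy pvLt x t) := by
  by_cases hb : pvLt x h
  · simp [PySem.List.insertBy, hb]
  · simp [PySem.List.insertBy, hb]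

-- head of the insertion-sort fold = the running first-minimum fold
theorem pv_foldl_insertBy_head (l : List (Int × Int × Int)) :
    ∀ (h : Int × Int × Int) (t : List (Int × Int × Int)),
      ∃ t', l.foldl (fun acc x => PySem.List.insertBy pvLt x acc) (h :: t)
          = (l.foldl (fun a x => if pvLt x a then x else a) h) :: t' := by
  induction l with
  | nil => intro h t; exact ⟨t, rfl⟩
  | cons x l ih =>
    intro h t
    by_cases hb : pvLt x h
    · simpa [List.foldl_cons, pv_insertBy_head, hb] using ih x (h :: t)
    · simpa [List.foldl_cons, pv_insertBy_head, hb] using ih h (PySem.List.insertBy pvLt x t)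

-- A's loop body is exactly "keep the earlier point unless the new one is strictly lex-smaller"
theorem pv_step_eq (s p : Int × Int × Int) :
    (if p.1 < s.1 then (p.1, p.2.1, p.2.2)
     else if p.1 = s.1 ∧ p.2.1 < s.2.1 then (s.1, p.2.1, p.2.2)
     else s)
    = (if pvLt p s then p else s) := by
  obtain ⟨px, py, pi⟩ := p
  obtain ⟨sx, sy, si⟩ := s
  simp only [pvLt]
  split_ifs with h1 h2 h3 h3 <;>
    simp_all; omega

-- ===== VERDICT (by name: the statement is the Claim_ definition above) =====
theorem getPmin_spec : Claim_equal_getPmin := by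
  intro points _
  unfold Spec_getPmin getPmin getPmin_alt
  simp only [PySem.List.sorted2, List.foldl_cons]
  rw [show (fun (a b : Int × Int × Int) =>
        decide (a.1 < b.1) || (!decide (b.1 < a.1) && decide (a.2.1 < b.2.1))) = pvLt from rfl]
  rw [show (if false = true then
        (fun (a b : Int × Int × Int) =>
          decide (b.1 < a.1) || (!decide (a.1 < b.1) && decide (b.2.1 < a.2.1)))
      else pvLt) = pvLt from rfl]
  have h0 : PySem.List.insertBy pvLt (2000, 2000, -1)
      ([] : List (Int × Int × Int)) = [(2000, 2000, -1)] := by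
    simp [PySem.List.insertBy]
  obtain ⟨t', ht⟩ := pv_foldl_insertBy_head points ((2000 : Int), (2000 : Int), (-1 : Int)) []
  rw [h0, ht, PySem.List.pyGetD_zero_cons,
    show (fun (s p : Int × Int × Int) =>
        if p.1 < s.1 then (p.1, p.2.1, p.2.2)
        else if p.1 = s.1 ∧ p.2.1 < s.2.1 then (s.1, p.2.1, p.2.2)
        else s) = (fun a x => if pvLt x a then x else a) from
      funext fun s => funext fun p => pv_step_eq s p]
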